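-- pv_equiv track=rewrite | github.com/shajith240/vs_code | vs code/python/cotd9-2.py | get_possible_flags
-- ===== SOURCE A (Python) =====
-- def get_possible_flags(chars_by_position):
--     def build_flags(current, pos):
--         if pos >= len(chars_by_position):
--             if current.startswith("cotd{") and current.endswith("}"):
--                 flags.append(current)
--             return
--
--         for char in chars_by_position[pos]:
--             build_flags(current + char, pos + 1)
--
--     flags = []
--     build_flags("", 0)
--     return flags
-- ===== SOURCE B (Python) =====
-- def get_possible_flags(chars_by_position):
--     # Level-by-level breadth-first build with early pruning: a partial string is
--     # kept only while it is still compatible with the fixed prefix "cotd{".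
--     prefix = "cotd{"
--     acc = [""]
--     for options in chars_by_position:
--         acc = [s for c in acc for ch in options
--                for s in (c + ch,)
--                if s.startswith(prefix) or prefix.startswith(s)]
--     return [s for s in acc if s.startswith(prefix) and s.endswith("}")]
-- ===== Notes on version B (the rewrite author's own statement) =====
-- stated objective: faster
-- what changed: A recursively enumerates the full cartesian product and filters complete strings; B builds candidates level by level and discards every partial string already incompatible with the fixed prefix 'cotd{', so mismatching branches are never expanded.
import Mathlib
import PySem

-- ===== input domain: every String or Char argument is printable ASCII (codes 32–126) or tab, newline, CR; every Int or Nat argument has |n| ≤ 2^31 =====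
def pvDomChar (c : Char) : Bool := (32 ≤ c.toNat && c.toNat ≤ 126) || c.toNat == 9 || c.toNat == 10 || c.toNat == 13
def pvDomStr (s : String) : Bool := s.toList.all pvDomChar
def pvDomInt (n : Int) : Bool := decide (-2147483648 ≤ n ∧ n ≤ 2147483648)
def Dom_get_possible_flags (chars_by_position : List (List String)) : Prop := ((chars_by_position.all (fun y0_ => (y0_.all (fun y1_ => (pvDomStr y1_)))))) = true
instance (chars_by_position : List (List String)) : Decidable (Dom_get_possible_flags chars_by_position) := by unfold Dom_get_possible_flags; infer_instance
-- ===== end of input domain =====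

-- B replaces A's exhaustive depth-first product enumeration by a breadth-first
-- level fold that prunes partial strings incompatible with the prefix "cotd{" (faster in a timing run on mismatching inputs).

-- ===== PORT A =====
-- A's recursion 'build_flags(current, pos)' on pos, ported as structural recursion
-- on the remaining suffix of chars_by_position, with the 'flags' accumulator explicit.
def pvBuildA : List (List String) → String → List String → List String
  | [], current, flags =>
      if PySem.Str.startswith current "cotd{" && PySem.Str.endswith current "}" then
        flags ++ [current]
      else flags
  | opts :: rest, current, flags =>
      opts.foldl (fun fl ch => pvBuildA rest (current ++ ch) fl) flags

def get_possible_flags (chars_by_position : List (List String)) : List String :=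
  pvBuildA chars_by_position "" []

-- ===== PORT B =====
def pvOk (s : String) : Bool :=
  PySem.Str.startswith s "cotd{" || PySem.Str.startswith "cotd{" s

def get_possible_flags_alt (chars_by_position : List (List String)) : List String :=
  let acc := chars_by_position.foldl
    (fun acc opts =>
      acc.flatMap (fun c => opts.filterMap (fun ch =>
        if pvOk (c ++ ch) then some (c ++ ch) else none))) [""]
  acc.filter (fun s => PySem.Str.startswith s "cotd{" && PySem.Str.endswith s "}")

-- ===== PRECONDITION & SPEC =====
def Spec_get_possible_flags (chars_by_position : List (List String)) (out : List String) : Prop := out = get_possible_flags_alt chars_by_position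
instance (chars_by_position : List (List String)) (out : List String) : Decidable (Spec_get_possible_flags chars_by_position out) := by unfold Spec_get_possible_flags; infer_instance

-- ===== CLAIM (what is proved, stated in full; the proofs are below) =====
def Claim_equal_get_possible_flags : Prop := ∀ (chars_by_position : List (List String)), Dom_get_possible_flags chars_by_position → Spec_get_possible_flags chars_by_position (get_possible_flags chars_by_position)

-- ===== LEMMAS AND PROOFS =====

def pvP (s : String) : Bool :=
  PySem.Str.startswith s "cotd{" && PySem.Str.endswith s "}"

-- all full concatenations starting from cur, in A's enumeration order
def pvCombos : List (List String) → String → List String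
  | [], cur => [cur]
  | opts :: rest, cur => opts.flatMap (fun ch => pvCombos rest (cur ++ ch))

theorem pvBuildA_eq : ∀ (l : List (List String)) (cur : String) (flags : List String),
    pvBuildA l cur flags = flags ++ (pvCombos l cur).filter pvP := by
  intro l
  induction l with
  | nil =>
      intro cur flags
      simp only [pvBuildA, pvCombos, List.filter, pvP]
      cases h : (PySem.Str.startswith cur "cotd{" && PySem.Str.endswith cur "}") <;> simp
  | cons opts rest ih =>
      intro cur flags
      simp only [pvBuildA, pvCombos]
      induction opts generalizing flags with
      | nil => simp
      | cons ch t iht =>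
          simp only [List.foldl_cons, List.flatMap_cons, List.filter_append]
          rw [iht, ih, List.append_assoc]

theorem pvCombos_shape : ∀ (l : List (List String)) (c : String) (x : String),
    x ∈ pvCombos l c → ∃ t, x = c ++ t := by
  intro l
  induction l with
  | nil => intro c x hx; simp [pvCombos] at hx; exact ⟨"", by simp [hx]⟩
  | cons opts rest ih =>
      intro c x hx
      simp only [pvCombos, List.mem_flatMap] at hx
      obtain ⟨ch, _, hx⟩ := hx
      obtain ⟨t, ht⟩ := ih (c ++ ch) x hx
      exact ⟨ch ++ t, by simp [ht, String.append_assoc]⟩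

theorem pvOk_of_append (s t : String) (h : pvOk (s ++ t) = true) : pvOk s = true := by
  simp only [pvOk, PySem.Str.startswith_eq, Bool.or_eq_true, PySem.Chars.startswith_iff,
    String.toList_append] at h ⊢
  rcases h with h | h
  · rcases le_total s.toList.length ("cotd{".toList).length with hl | hl
    · exact Or.inr (List.prefix_of_prefix_length_le (List.prefix_append _ _) h hl)
    · exact Or.inl (List.prefix_of_prefix_length_le h (List.prefix_append _ _) hl)
  · exact Or.inr (List.IsPrefix.trans (List.prefix_append _ _) h)

theorem pvCombos_dead (l : List (List String)) (c : String) (h : pvOk c = false) :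
    (pvCombos l c).filter pvOk = [] := by
  rw [List.filter_eq_nil_iff]
  intro x hx
  obtain ⟨t, ht⟩ := pvCombos_shape l c x hx
  subst ht
  intro hok
  rw [pvOk_of_append c t hok] at h
  exact Bool.true_eq_false.mp h

theorem pvFold_eq : ∀ (l : List (List String)) (acc : List String),
    (∀ c ∈ acc, pvOk c = true) →
    l.foldl (fun acc opts =>
        acc.flatMap (fun c => opts.filterMap (fun ch =>
          if pvOk (c ++ ch) then some (c ++ ch) else none))) acc
      = acc.flatMap (fun c => (pvCombos l c).filter pvOk) := by
  intro l
  induction l with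
  | nil =>
      intro acc hacc
      simp only [List.foldl_nil, pvCombos]
      induction acc with
      | nil => simp
      | cons c cs ih =>
          have hc : pvOk c = true := hacc c List.mem_cons_self
          simp only [List.flatMap_cons, List.filter, hc, List.singleton_append,
            List.cons.injEq, true_and]
          exact ih (fun x hx => hacc x (List.mem_cons_of_mem _ hx))
  | cons opts rest ih =>
      intro acc hacc
      simp only [List.foldl_cons]
      rw [ih _ (by
        intro c hc
        simp only [List.mem_flatMap, List.mem_filterMap] at hc
        obtain ⟨a, _, ch, _, hif⟩ := hc
        by_cases hok : pvOk (a ++ ch) = true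
        · simp [hok] at hif; rw [← hif]; exact hok
        · simp [hok] at hif)]
      rw [List.flatMap_assoc]
      apply List.flatMap_congr
      intro c _
      simp only [pvCombos, List.filter_flatMap]
      induction opts with
      | nil => simp
      | cons ch t iht =>
          by_cases hok : pvOk (c ++ ch) = true
          · simp [List.flatMap_cons, hok, iht]
          · simp only [Bool.not_eq_true] at hok
            simp [List.flatMap_cons, hok, iht,
              pvCombos_dead rest (c ++ ch) hok]

theorem pvFilter_absorb (l : List String) :
    (l.filter pvOk).filter pvP = l.filter pvP := by
  rw [List.filter_filter]
  apply List.filter_congr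
  intro s _
  cases hp : pvP s
  · simp
  · have h1 : PySem.Str.startswith s "cotd{" = true := by
      simp only [pvP, Bool.and_eq_true] at hp; exact hp.1
    have h2 : pvOk s = true := by simp only [pvOk, h1, Bool.true_or]
    simp [h2]

-- ===== VERDICT (by name: the statement is the Claim_ definition above) =====
theorem get_possible_flags_spec : Claim_equal_get_possible_flags := by
  intro cbp _
  unfold Spec_get_possible_flags get_possible_flags get_possible_flags_alt
  rw [pvBuildA_eq, pvFold_eq cbp [""] (by intro c hc; simp at hc; subst hc; decide)]
  simp only [List.flatMap_cons, List.flatMap_nil, List.append_nil, List.nil_append]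
  exact (pvFilter_absorb (pvCombos cbp "")).symm
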